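-- pv_equiv track=rewrite | github.com/Captain-Zod/letters-scanner | arrayhelper.py | parse_image
-- ===== SOURCE A (Python) =====
-- def parse_image(image, div, pixel):
--     res = []
--     slen = int(len(image) / div)
--     for x in range(0,div):
--         res.append([])
--         for y in range(0,div):
--             isWhites = 0
--             for i in range(0,slen):
--                 for j in range(0, slen):
--                     #todo centralize like FirstRightColumn + FirstLeftColumn / 2? same for rows?
--                     isWhite = is_white_pixel(image[i+(x*slen)][j+(y*slen)], pixel)
--                     if not isWhite:
--                         isWhites += 1
--             res[x].append(int(isWhites > 0))
--     return res
--
-- def is_white_pixel(rgb, pixel):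
--     for i in rgb:
--         if i != pixel:
--             return False
--     return True
-- ===== SOURCE B (Python) =====
-- def parse_image(image, div, pixel):
--     slen = int(len(image) / div)
--     grid = [[0] * div for _ in range(div)]
--     n = len(grid) * slen
--     for i in range(n):
--         for j in range(n):
--             if any(c != pixel for c in image[i][j]):
--                 grid[i // slen][j // slen] = 1
--     return grid
-- ===== Notes on version B (the rewrite author's own statement) =====
-- stated objective: alternative
-- what changed: B replaces A's four-level block-then-pixel nesting with its per-block non-white counter by a single flat scan over all pixels that scatters a presence mark into grid[i//slen][j//slen], the grid being preallocated with zeros.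
import Mathlib
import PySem

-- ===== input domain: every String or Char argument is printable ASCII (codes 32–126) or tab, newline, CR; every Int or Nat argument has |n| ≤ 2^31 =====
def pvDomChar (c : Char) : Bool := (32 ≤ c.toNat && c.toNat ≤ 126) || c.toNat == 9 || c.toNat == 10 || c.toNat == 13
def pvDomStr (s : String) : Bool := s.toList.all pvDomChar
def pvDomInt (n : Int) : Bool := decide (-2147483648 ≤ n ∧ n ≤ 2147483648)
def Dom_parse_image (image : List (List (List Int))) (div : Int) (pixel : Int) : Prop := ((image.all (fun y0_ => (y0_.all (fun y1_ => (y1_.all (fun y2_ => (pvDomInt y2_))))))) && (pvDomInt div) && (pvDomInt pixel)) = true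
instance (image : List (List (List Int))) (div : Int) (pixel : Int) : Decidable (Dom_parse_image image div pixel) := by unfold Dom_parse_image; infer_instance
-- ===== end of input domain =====

-- B: flat pixel scan scattering presence marks into a preallocated zero grid, instead of A's
-- per-block nested loops with a non-white counter (objective: alternative decomposition).


-- ===== PORT A =====
def is_white_pixel (rgb : List Int) (pixel : Int) : Bool :=
  match rgb with
  | [] => true
  | i :: rest => if i ≠ pixel then false else is_white_pixel rest pixel

def parse_image (image : List (List (List Int))) (div : Int) (pixel : Int) : List (List Int) :=
  -- slen = int(len(image) / div): exact as truncating division on the feasible sizes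
  let slen : Int := PySem.Int.truncdiv (image.length : Int) div
  (PySem.List.pyRange 0 div 1).foldl (fun res x =>
    let res := res ++ [([] : List Int)]
    (PySem.List.pyRange 0 div 1).foldl (fun res y =>
      let isWhites : Int :=
        (PySem.List.pyRange 0 slen 1).foldl (fun acc i =>
          (PySem.List.pyRange 0 slen 1).foldl (fun acc j =>
            let isWhite := is_white_pixel
              (PySem.List.pyGetD (PySem.List.pyGetD image (i + x * slen) []) (j + y * slen) []) pixel
            if !isWhite then acc + 1 else acc) acc) 0
      -- res[x].append(v): x is always a valid index of res here, so pySetD/pyGetD are exact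
      PySem.List.pySetD res x (PySem.List.pyGetD res x [] ++ [if isWhites > 0 then (1 : Int) else 0]))
      res) []

-- ===== PORT B =====
def parse_image_alt (image : List (List (List Int))) (div : Int) (pixel : Int) : List (List Int) :=
  let slen : Int := PySem.Int.truncdiv (image.length : Int) div
  let grid : List (List Int) := (PySem.List.pyRange 0 div 1).map (fun _ => PySem.List.pyRepeat [(0 : Int)] div)
  let n : Int := (grid.length : Int) * slen
  (PySem.List.pyRange 0 n 1).foldl (fun g i =>
    (PySem.List.pyRange 0 n 1).foldl (fun g j =>
      if (PySem.List.pyGetD (PySem.List.pyGetD image i []) j []).any (fun c => c != pixel) then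
        PySem.List.pySetD g (PySem.Int.floordiv i slen)
          (PySem.List.pySetD (PySem.List.pyGetD g (PySem.Int.floordiv i slen) []) (PySem.Int.floordiv j slen) 1)
      else g) g) grid

-- ===== PRECONDITION & SPEC =====
-- Pre_ excludes exactly the inputs where the Python A raises: div = 0 (ZeroDivisionError) and,
-- for div > 0, images whose first div*slen rows are shorter than div*slen columns (IndexError).
def Pre_parse_image (image : List (List (List Int))) (div : Int) (pixel : Int) : Prop :=
  div ≠ 0 ∧ (0 < div →
    ∀ row ∈ image.take (div * PySem.Int.truncdiv (image.length : Int) div).toNat,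
      div * PySem.Int.truncdiv (image.length : Int) div ≤ (row.length : Int))
instance (image : List (List (List Int))) (div : Int) (pixel : Int) : Decidable (Pre_parse_image image div pixel) := by unfold Pre_parse_image; infer_instance

def pvWitness_parse_image : List (List (List Int)) × Int × Int := ([[[1, 1], [0, 0]], [[1, 1], [1, 1]]], 2, 1)

def Spec_parse_image (image : List (List (List Int))) (div : Int) (pixel : Int) (out : List (List Int)) : Prop := out = parse_image_alt image div pixel
instance (image : List (List (List Int))) (div : Int) (pixel : Int) (out : List (List Int)) : Decidable (Spec_parse_image image div pixel out) := by unfold Spec_parse_image; infer_instance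

-- ===== CLAIM (what is proved, stated in full; the proofs are below) =====
def Claim_equal_parse_image : Prop := ∀ (image : List (List (List Int))) (div : Int) (pixel : Int), Dom_parse_image image div pixel → Pre_parse_image image div pixel → Spec_parse_image image div pixel (parse_image image div pixel)

-- ===== LEMMAS AND PROOFS =====

-- the common block-presence description both ports are reduced to
def pvHit (image : List (List (List Int))) (pixel : Int) (i j : Int) : Bool :=
  (PySem.List.pyGetD (PySem.List.pyGetD image i []) j []).any (fun c => c != pixel)

def pvCond (image : List (List (List Int))) (pixel s x y : Int) : Bool :=
  (PySem.List.pyRange 0 s 1).any (fun i => (PySem.List.pyRange 0 s 1).any (fun j =>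
    pvHit image pixel (i + x * s) (j + y * s)))

def pvTarget (image : List (List (List Int))) (pixel div s : Int) : List (List Int) :=
  (PySem.List.pyRange 0 div 1).map (fun x => (PySem.List.pyRange 0 div 1).map (fun y =>
    if pvCond image pixel s x y then (1 : Int) else 0))

def pvCnt (image : List (List (List Int))) (pixel s x y : Int) : Int :=
  (PySem.List.pyRange 0 s 1).foldl (fun acc i =>
    (PySem.List.pyRange 0 s 1).foldl (fun acc j =>
      if !is_white_pixel (PySem.List.pyGetD (PySem.List.pyGetD image (i + x * s) []) (j + y * s) []) pixel
      then acc + 1 else acc) acc) 0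


theorem iwp_eq (rgb : List Int) (pixel : Int) :
    is_white_pixel rgb pixel = !(rgb.any (fun c => c != pixel)) := by
  induction rgb with
  | nil => simp [is_white_pixel]
  | cons a t ih => by_cases h : a = pixel <;> simp [is_white_pixel, h, ih]

theorem sum_countP_pos {α β : Type} (L : List α) (R : List β) (p : α → β → Bool) :
    ((0:Int) < (L.map (fun i => ((R.countP (p i) : Nat) : Int))).sum) ↔
      (L.any (fun i => R.any (p i)) = true) := by
  induction L with
  | nil => simp
  | cons a L ih =>
    have hS : (0:Int) ≤ (L.map (fun i => ((R.countP (p i) : Nat) : Int))).sum := by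
      apply List.sum_nonneg; intro x hx
      simp only [List.mem_map] at hx
      obtain ⟨i, _, rfl⟩ := hx; positivity
    have hc : (0:Int) ≤ ((R.countP (p a) : Nat) : Int) := by positivity
    simp only [List.map_cons, List.sum_cons, List.any_cons, ← ih, Bool.or_eq_true]
    constructor
    · intro h
      rcases lt_or_ge (0:Int) ((R.countP (p a) : Nat) : Int) with hpos | hz
      · left
        have : 0 < R.countP (p a) := by exact_mod_cast hpos
        rw [List.countP_pos_iff] at this
        obtain ⟨x, hx, hpx⟩ := this
        simp [List.any_eq_true]; exact ⟨x, hx, hpx⟩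
      · right; omega
    · rintro (h | h)
      · have : 0 < R.countP (p a) := by
          rw [List.countP_pos_iff]; simpa [List.any_eq_true] using h
        have : (0:Int) < ((R.countP (p a) : Nat) : Int) := by exact_mod_cast this
        omega
      · omega


theorem cnt_iff (image : List (List (List Int))) (pixel s x y : Int) :
    (0 < pvCnt image pixel s x y) ↔ pvCond image pixel s x y = true := by
  unfold pvCnt
  simp only [iwp_eq, Bool.not_not, PySem.List.foldl_count_if, PySem.List.foldl_add, zero_add]
  exact sum_countP_pos _ _ _

theorem rowfold (v : Int → Int) (ys : List Int) :
    ∀ (res : List (List Int)) (x : Nat), x < res.length →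
    ys.foldl (fun r y => PySem.List.pySetD r (x : Int) (PySem.List.pyGetD r (x : Int) [] ++ [v y])) res
      = res.set x (res.getD x [] ++ ys.map v) := by
  induction ys with
  | nil =>
    intro res x hx
    simp only [List.foldl_nil, List.getD_eq_getElem?_getD, List.getElem?_eq_getElem hx]
    simp
  | cons y ys ih =>
    intro res x hx
    simp only [List.foldl_cons]
    rw [PySem.List.pySetD_natCast, PySem.List.pyGetD_natCast,
      ih (res.set x (res.getD x [] ++ [v y])) x (by simpa using hx)]
    rw [List.set_set]
    have : (res.set x (res.getD x [] ++ [v y])).getD x [] = res.getD x [] ++ [v y] := by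
      rw [List.getD_eq_getElem _ _ (by simpa using hx), List.getElem_set_self]
    rw [this, List.append_assoc]
    simp


theorem gridfold (v : Int → Int → Int) (ys : List Int) (d : Nat) :
    (PySem.List.pyRange 0 (d : Int) 1).foldl (fun res x =>
        ys.foldl (fun r y => PySem.List.pySetD r x (PySem.List.pyGetD r x [] ++ [v x y])) (res ++ [[]])) []
      = (PySem.List.pyRange 0 (d : Int) 1).map (fun x => ys.map (v x)) := by
  induction d with
  | zero => simp [PySem.List.pyRange_one_eq_nil]
  | succ d ih =>
    have hcast : ((d+1 : Nat) : Int) = (d : Int) + 1 := by push_cast; ring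
    rw [hcast, PySem.List.pyRange_one_succ_right (by positivity)]
    rw [List.foldl_append, List.map_append, ih]
    simp only [List.foldl_cons, List.foldl_nil, List.map_cons, List.map_nil]
    set res := (PySem.List.pyRange 0 (d : Int) 1).map (fun x => ys.map (v x)) with hres
    have hlen : res.length = d := by
      simp [hres, PySem.List.length_pyRange_one]
    have hlen2 : d < (res ++ [[]]).length := by simp [hlen]
    rw [show ((d:Int)) = ((d:Nat):Int) from rfl, rowfold (v (d:Int)) ys (res ++ [[]]) d hlen2]
    have hget : (res ++ [([]:List Int)]).getD d [] = [] := by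
      rw [List.getD_eq_getElem?_getD, List.getElem?_append_right (by omega)]
      simp [hlen]
    rw [hget]
    rw [List.set_append_right _ _ (by omega)]
    simp [hlen]

theorem parse_image_eq_target (image : List (List (List Int))) (div pixel : Int) :
    parse_image image div pixel
      = pvTarget image pixel div (PySem.Int.truncdiv (image.length : Int) div) := by
  by_cases hd : div ≤ 0
  · unfold parse_image pvTarget
    rw [PySem.List.pyRange_one_eq_nil hd]
    simp
  · rw [not_le] at hd
    have hd2 : 0 < div := hd
    have hdiv : div = ((div.toNat : Nat) : Int) := by omega
    set s := PySem.Int.truncdiv (image.length : Int) div with hs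
    unfold parse_image pvTarget
    rw [← hs, hdiv]
    refine Eq.trans (gridfold (fun x y => if 0 < pvCnt image pixel s x y then (1:Int) else 0)
      (PySem.List.pyRange 0 ((div.toNat : Nat) : Int) 1) div.toNat) ?_
    apply List.map_congr_left; intro x _
    apply List.map_congr_left; intro y _
    exact if_congr (cnt_iff image pixel s x y) rfl rfl

theorem flatten {α β γ : Type} (xs : List α) (ys : List β) (F : γ → α → β → γ) :
    ∀ (g : γ), xs.foldl (fun g i => ys.foldl (fun g j => F g i j) g) g
      = (xs.flatMap (fun i => ys.map (fun j => (i, j)))).foldl (fun g t => F g t.1 t.2) g := by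
  induction xs with
  | nil => intro g; simp
  | cons x xs ih =>
    intro g
    simp only [List.foldl_cons, List.flatMap_cons, List.foldl_append, List.foldl_map, ih]

theorem scatter (hit : Int → Int → Bool) (fd : Int → Int) (d : Nat) :
    ∀ (L : List (Int × Int)) (g : List (List Int)),
    (∀ row ∈ g, row.length = d) →
    (∀ t ∈ L, 0 ≤ fd t.1 ∧ (fd t.1).toNat < g.length ∧ 0 ≤ fd t.2 ∧ (fd t.2).toNat < d) →
    (let res := L.foldl (fun g t => if hit t.1 t.2 then
        PySem.List.pySetD g (fd t.1) (PySem.List.pySetD (PySem.List.pyGetD g (fd t.1) []) (fd t.2) 1)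
      else g) g
     res.length = g.length ∧ (∀ row ∈ res, row.length = d) ∧
     ∀ a b : Nat, (res.getD a []).getD b 0 =
       if L.any (fun t => hit t.1 t.2 && (fd t.1 == (a : Int)) && (fd t.2 == (b : Int))) then 1
       else (g.getD a []).getD b 0) := by
  intro L
  induction L with
  | nil => intro g hrow _; exact ⟨rfl, hrow, by simp⟩
  | cons t L ih =>
    intro g hrow hb
    obtain ⟨h1, h2, h3, h4⟩ := hb t (List.mem_cons_self)
    by_cases ht : hit t.1 t.2
    · -- the update step
      set r := (fd t.1).toNat with hr
      set c := (fd t.2).toNat with hc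
      have hrg : r < g.length := h2
      have hstep : (if hit t.1 t.2 then
          PySem.List.pySetD g (fd t.1) (PySem.List.pySetD (PySem.List.pyGetD g (fd t.1) []) (fd t.2) 1)
          else g) = g.set r (g[r].set c 1) := by
        rw [if_pos ht, PySem.List.pySetD_of_nonneg _ _ h1,
          PySem.List.pyGetD_eq_getElem _ _ h1 (by omega), PySem.List.pySetD_of_nonneg _ _ h3]
      set g' := g.set r (g[r].set c 1) with hg'
      have hrow' : ∀ row ∈ g', row.length = d := by
        intro row hm
        rcases List.mem_or_eq_of_mem_set hm with hm' | rfl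
        · exact hrow row hm'
        · rw [List.length_set]; exact hrow _ (List.getElem_mem hrg)
      have hb' : ∀ u ∈ L, 0 ≤ fd u.1 ∧ (fd u.1).toNat < g'.length ∧ 0 ≤ fd u.2 ∧ (fd u.2).toNat < d := by
        intro u hu
        have := hb u (List.mem_cons_of_mem _ hu)
        simpa [hg', List.length_set] using this
      obtain ⟨ihl, ihrow, ihe⟩ := ih g' hrow' hb'
      simp only [List.foldl_cons, hstep, ← hg']
      refine ⟨by rw [ihl]; simp [hg'], ihrow, ?_⟩
      intro a b
      rw [ihe a b]
      by_cases hany : L.any (fun u => hit u.1 u.2 && (fd u.1 == (a : Int)) && (fd u.2 == (b : Int)))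
      · rw [if_pos hany, if_pos]; simp [List.any_cons, hany]
      · rw [if_neg hany]
        simp only [List.any_cons, hany, Bool.or_false]
        have hfd1 : (fd t.1 == (a : Int)) = (r == a) := by
          rw [Bool.eq_iff_iff]; simp only [beq_iff_eq]; omega
        have hfd2 : (fd t.2 == (b : Int)) = (c == b) := by
          rw [Bool.eq_iff_iff]; simp only [beq_iff_eq]; omega
        rw [hfd1, hfd2, ht]
        have hcd : c < g[r].length := by rw [hrow _ (List.getElem_mem hrg)]; exact h4
        by_cases har : r = a
        · subst har
          have hga : g'.getD r [] = g[r].set c 1 := by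
            rw [List.getD_eq_getElem?_getD, hg', List.getElem?_set_self' , List.getElem?_eq_getElem hrg]
            rfl
          by_cases hbc : c = b
          · subst hbc
            simp only [beq_self_eq_true, Bool.and_true, Bool.true_and, if_true, hga]
            rw [List.getD_eq_getElem?_getD, List.getElem?_set_self hcd]
            rfl
          · have : (c == b) = false := by simp [hbc]
            simp only [this, beq_self_eq_true, Bool.and_false, Bool.true_and, if_false, hga]
            rw [List.getD_eq_getElem?_getD, List.getElem?_set_ne (by omega),
              List.getD_eq_getElem?_getD, List.getD_eq_getElem?_getD, List.getElem?_eq_getElem hrg]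
            rfl
        · have : (r == a) = false := by simp [har]
          simp only [this, Bool.false_and, Bool.and_false, Bool.true_and, if_false]
          have hga : g'.getD a [] = g.getD a [] := by
            rw [List.getD_eq_getElem?_getD, List.getD_eq_getElem?_getD, hg',
              List.getElem?_set_ne (by omega)]
          rw [hga]; simp
    · simp only [List.foldl_cons, if_neg ht]
      obtain ⟨ihl, ihrow, ihe⟩ := ih g hrow (fun u hu => hb u (List.mem_cons_of_mem _ hu))
      refine ⟨ihl, ihrow, ?_⟩
      intro a b
      rw [ihe a b]
      simp only [List.any_cons, ht, Bool.false_and, Bool.false_or]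

theorem cond_equiv (image : List (List (List Int))) (pixel s : Int) (hs : 0 < s) (d a b : Nat)
    (ha : a < d) (hb : b < d) :
    (((PySem.List.pyRange 0 ((d:Int)*s) 1).flatMap
        (fun i => (PySem.List.pyRange 0 ((d:Int)*s) 1).map (fun j => (i,j)))).any
      (fun t => pvHit image pixel t.1 t.2 && (PySem.Int.floordiv t.1 s == (a:Int)) && (PySem.Int.floordiv t.2 s == (b:Int))))
    = pvCond image pixel s (a:Int) (b:Int) := by
  rw [Bool.eq_iff_iff]
  simp only [List.any_eq_true, List.mem_flatMap, List.mem_map, PySem.List.mem_pyRange_one,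
    pvCond, Bool.and_eq_true, beq_iff_eq]
  constructor
  · rintro ⟨t, ⟨i, ⟨hi0, hin⟩, j, ⟨hj0, hjn⟩, rfl⟩, ⟨hhit, hfa⟩, hfb⟩
    rw [PySem.Int.floordiv_eq_iff_of_pos hs] at hfa hfb
    refine ⟨i - (a:Int)*s, ⟨by nlinarith [hfa.1, hfa.2], by nlinarith [hfa.1, hfa.2]⟩,
      j - (b:Int)*s, ⟨by nlinarith [hfb.1, hfb.2], by nlinarith [hfb.1, hfb.2]⟩, ?_⟩
    simpa using hhit
  · rintro ⟨i, ⟨hi0, his⟩, j, ⟨hj0, hjs⟩, hhit⟩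
    have had : (a:Int) + 1 ≤ (d:Int) := by exact_mod_cast ha
    have hbd : (b:Int) + 1 ≤ (d:Int) := by exact_mod_cast hb
    refine ⟨(i + (a:Int)*s, j + (b:Int)*s),
      ⟨i + (a:Int)*s, ⟨by nlinarith, by nlinarith⟩, j + (b:Int)*s, ⟨by nlinarith, by nlinarith⟩, rfl⟩,
      ⟨hhit, ?_⟩, ?_⟩ <;>
    · rw [PySem.Int.floordiv_eq_iff_of_pos hs]
      constructor <;> nlinarith

theorem grid_eq_of_entries (g1 g2 : List (List Int)) (d : Nat) (h1 : g1.length = d)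
    (h2 : g2.length = d) (r1 : ∀ row ∈ g1, row.length = d) (r2 : ∀ row ∈ g2, row.length = d)
    (he : ∀ a b : Nat, a < d → b < d → (g1.getD a []).getD b 0 = (g2.getD a []).getD b 0) :
    g1 = g2 := by
  apply List.ext_getElem (by omega)
  intro i hi1 hi2
  have hr1 : g1[i].length = d := r1 _ (List.getElem_mem hi1)
  have hr2 : g2[i].length = d := r2 _ (List.getElem_mem hi2)
  apply List.ext_getElem (by omega)
  intro j hj1 hj2
  have := he i j (by omega) (by omega)
  rwa [List.getD_eq_getElem _ _ hi1, List.getD_eq_getElem _ _ hi2,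
    List.getD_eq_getElem _ _ hj1, List.getD_eq_getElem _ _ hj2] at this

theorem parse_image_alt_eq_target (image : List (List (List Int))) (div pixel : Int) :
    parse_image_alt image div pixel
      = pvTarget image pixel div (PySem.Int.truncdiv (image.length : Int) div) := by
  set s := PySem.Int.truncdiv (image.length : Int) div with hs
  by_cases hd : div ≤ 0
  · unfold parse_image_alt pvTarget
    rw [← hs, PySem.List.pyRange_one_eq_nil hd]
    simp [PySem.List.pyRange_one_eq_nil (le_refl (0:Int))]
  · have hd' : 0 < div := by omega
    have hs0 : 0 ≤ s := by
      rw [hs]; unfold PySem.Int.truncdiv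
      exact Int.tdiv_nonneg (by positivity) (by omega)
    have hdiv : div = ((div.toNat : Nat) : Int) := by omega
    set d := div.toNat with hdd
    have hgridlen : ((PySem.List.pyRange 0 div 1).map
        (fun _ => PySem.List.pyRepeat [(0 : Int)] div)).length = d := by
      simp [PySem.List.length_pyRange_one]; omega
    rcases eq_or_lt_of_le hs0 with hz | hpos
    · -- slen = 0: no pixels are scanned, grid of zeros on both sides
      unfold parse_image_alt pvTarget
      rw [← hs, ← hz]
      dsimp only
      rw [mul_zero, PySem.List.pyRange_one_eq_nil (le_refl (0:Int))]
      simp only [List.foldl_nil]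
      unfold pvCond
      rw [PySem.List.pyRange_one_eq_nil (le_refl (0:Int))]
      simp [PySem.List.pyRepeat_singleton, List.map_const', PySem.List.length_pyRange_one]
    · -- main case: div > 0, slen > 0
      unfold parse_image_alt pvTarget
      rw [← hs]
      dsimp only
      rw [show (((PySem.List.pyRange 0 div 1).map
          (fun _ => PySem.List.pyRepeat [(0 : Int)] div)).length : Int) = (d : Int) from by
        rw [hgridlen]]
      set grid0 := (PySem.List.pyRange 0 div 1).map (fun _ => PySem.List.pyRepeat [(0 : Int)] div)
        with hg0
      have hrows0 : ∀ row ∈ grid0, row.length = d := by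
        intro row hm
        rw [hg0] at hm
        simp only [List.mem_map] at hm
        obtain ⟨_, _, rfl⟩ := hm
        rw [PySem.List.pyRepeat_singleton, List.length_replicate]
      set P := (PySem.List.pyRange 0 ((d:Int)*s) 1).flatMap
        (fun i => (PySem.List.pyRange 0 ((d:Int)*s) 1).map (fun j => (i,j))) with hP
      have hbnd : ∀ t ∈ P, 0 ≤ PySem.Int.floordiv t.1 s ∧ (PySem.Int.floordiv t.1 s).toNat < grid0.length
          ∧ 0 ≤ PySem.Int.floordiv t.2 s ∧ (PySem.Int.floordiv t.2 s).toNat < d := by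
        intro t hm
        rw [hP] at hm
        simp only [List.mem_flatMap, List.mem_map, PySem.List.mem_pyRange_one] at hm
        obtain ⟨i, ⟨hi0, hin⟩, j, ⟨hj0, hjn⟩, rfl⟩ := hm
        dsimp only
        rw [PySem.Int.floordiv_eq_ediv_of_pos hpos, PySem.Int.floordiv_eq_ediv_of_pos hpos]
        have e1 : 0 ≤ i / s := Int.ediv_nonneg hi0 (by omega)
        have e2 : 0 ≤ j / s := Int.ediv_nonneg hj0 (by omega)
        have l1 : i / s < (d:Int) := Int.ediv_lt_of_lt_mul hpos (by linarith)
        have l2 : j / s < (d:Int) := Int.ediv_lt_of_lt_mul hpos (by linarith)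
        refine ⟨e1, ?_, e2, ?_⟩
        · rw [hgridlen]; omega
        · omega
      obtain ⟨hl, hrowsR, he⟩ := scatter (pvHit image pixel) (fun k => PySem.Int.floordiv k s) d P grid0 hrows0 hbnd
      refine (flatten (PySem.List.pyRange 0 ((d:Int)*s) 1) (PySem.List.pyRange 0 ((d:Int)*s) 1)
        (fun g i j => if pvHit image pixel i j then
          PySem.List.pySetD g (PySem.Int.floordiv i s)
            (PySem.List.pySetD (PySem.List.pyGetD g (PySem.Int.floordiv i s) []) (PySem.Int.floordiv j s) 1)
          else g) grid0).trans ?_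
      have hdlen : ((div - 0).toNat) = d := by omega
      apply grid_eq_of_entries _ _ d
      · rw [hl, hgridlen]
      · simp [PySem.List.length_pyRange_one, hdlen]; omega
      · exact hrowsR
      · intro row hm
        simp only [List.mem_map] at hm
        obtain ⟨_, _, rfl⟩ := hm
        simp [PySem.List.length_pyRange_one, hdlen]; omega
      · intro a b ha hb
        rw [he a b, cond_equiv image pixel s hpos d a b ha hb]
        have hga : grid0.getD a [] = List.replicate d (0:Int) := by
          rw [List.getD_eq_getElem?_getD, hg0, List.getElem?_map,
            PySem.List.getElem?_pyRange_one, if_pos (show a < ((div:Int) - 0).toNat by omega)]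
          simp [PySem.List.pyRepeat_singleton, hdd]
        have hg0e : (grid0.getD a []).getD b 0 = 0 := by
          rw [hga, List.getD_eq_getElem _ _ (by rw [List.length_replicate]; omega)]
          simp
        rw [hg0e]
        rw [List.getD_eq_getElem?_getD (l := (PySem.List.pyRange 0 div 1).map
            (fun x => (PySem.List.pyRange 0 div 1).map
              (fun y => if pvCond image pixel s x y then (1:Int) else 0))) (i := a),
          List.getElem?_map,
          PySem.List.getElem?_pyRange_one, if_pos (show a < ((div:Int)-0).toNat by omega)]
        simp only [Option.map_some, Option.getD_some]
        rw [List.getD_eq_getElem?_getD, List.getElem?_map,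
          PySem.List.getElem?_pyRange_one, if_pos (show b < ((div:Int)-0).toNat by omega)]
        simp only [Option.map_some, Option.getD_some, zero_add]

-- ===== VERDICT (by name: the statement is the Claim_ definition above) =====
theorem parse_image_spec : Claim_equal_parse_image := by
  intro image div pixel _ _
  unfold Spec_parse_image
  rw [parse_image_eq_target, parse_image_alt_eq_target]
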